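-- pv_equiv track=rewrite | github.com/nasa/cmr-metadata-review | lib/CheckerDIF.py | check_Related_URL_Content_Type
-- ===== SOURCE A (Python) =====
-- def check_Related_URL_Content_Type(val):
--     val = val.split(';')
--     result = ''
--     flag = 0
--     for item in val:
--         if(item == "0"  and flag != 2):
--             flag = 1
--         elif(item != '1'):
--             result += item + ';'
--             flag = 2
--
--     if(flag == 2): return result
--     if(flag == 1): return 'OK'
--     return "OK - no GET DATA link is provided"
-- ===== SOURCE B (Python) =====
-- def check_Related_URL_Content_Type(val):
--     toks = val.split(';')
--     rest = toks
--     while rest and rest[0] in ("0", "1"):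
--         rest = rest[1:]
--     if rest:
--         return ''.join(t + ';' for t in rest if t != '1')
--     return 'OK' if '0' in toks else "OK - no GET DATA link is provided"
-- ===== Notes on version B (the rewrite author's own statement) =====
-- stated objective: simpler
-- what changed: Replaces the three-valued flag state machine with a two-phase pass: drop the leading run of '0'/'1' tokens, then join the remaining tokens (skipping '1') or report OK / no-link from a membership test.
import Mathlib
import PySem

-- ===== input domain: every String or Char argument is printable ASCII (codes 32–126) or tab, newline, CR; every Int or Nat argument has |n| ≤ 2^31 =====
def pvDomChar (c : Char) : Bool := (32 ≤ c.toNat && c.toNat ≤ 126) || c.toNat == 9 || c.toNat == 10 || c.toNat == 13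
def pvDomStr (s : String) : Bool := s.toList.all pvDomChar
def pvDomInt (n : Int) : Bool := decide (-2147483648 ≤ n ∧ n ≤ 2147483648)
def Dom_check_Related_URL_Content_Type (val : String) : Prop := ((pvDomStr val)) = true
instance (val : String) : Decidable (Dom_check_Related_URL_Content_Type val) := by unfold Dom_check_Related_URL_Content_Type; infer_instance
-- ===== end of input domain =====

-- B replaces A's three-valued flag state machine by a drop-leading-'0'/'1' pass then a filter-and-join: simpler decomposition, same cost.


-- ===== PORT A =====
-- A's loop body ("if item == '0' and flag != 2: flag = 1 / elif item != '1': result += item + ';'; flag = 2")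
def pvStepA (st : String × Int) (item : String) : String × Int :=
  if item = "0" ∧ st.2 ≠ 2 then (st.1, 1)
  else if item ≠ "1" then (st.1 ++ item ++ ";", 2)
  else st

-- A's return chain after the loop
def pvFinishA (st : String × Int) : String :=
  if st.2 = 2 then st.1
  else if st.2 = 1 then "OK"
  else "OK - no GET DATA link is provided"

-- literal port of A: fold pvStepA over the tokens from (result, flag) = ('', 0), then the flag-driven returns
def check_Related_URL_Content_Type (val : String) : String :=
  let toks := (PySem.Str.split? val ";").getD []   -- ";" ≠ "", so split? is some: exact for val.split(';')
  pvFinishA (toks.foldl pvStepA ("", 0))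

-- ===== PORT B =====
-- B's "''.join(t + ';' for t in rest if t != '1')"
def pvJoinB (ts : List String) : String :=
  String.join ((ts.filter (fun t => t ≠ "1")).map (fun t => t ++ ";"))

-- literal port of B: drop the leading run of "0"/"1" tokens, then filter-and-join, else a membership test
def check_Related_URL_Content_Type_alt (val : String) : String :=
  let toks := (PySem.Str.split? val ";").getD []   -- ";" ≠ "", so split? is some: exact for val.split(';')
  let rest := toks.dropWhile (fun t => t == "0" || t == "1")
  if rest ≠ [] then pvJoinB rest
  else if toks.contains "0" then "OK"
  else "OK - no GET DATA link is provided"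

-- ===== PRECONDITION & SPEC =====
def Spec_check_Related_URL_Content_Type (val : String) (out : String) : Prop := out = check_Related_URL_Content_Type_alt val
instance (val : String) (out : String) : Decidable (Spec_check_Related_URL_Content_Type val out) := by unfold Spec_check_Related_URL_Content_Type; infer_instance

-- ===== CLAIM (what is proved, stated in full; the proofs are below) =====
def Claim_equal_check_Related_URL_Content_Type : Prop := ∀ (val : String), Dom_check_Related_URL_Content_Type val → Spec_check_Related_URL_Content_Type val (check_Related_URL_Content_Type val)

-- ===== LEMMAS AND PROOFS =====

lemma pvJoin_foldl (l : List String) (a : String) :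
    l.foldl (· ++ ·) a = a ++ String.join l := by
  induction l generalizing a with
  | nil => simp [String.join]
  | cons s l ih =>
    have hj : String.join (s :: l) = l.foldl (· ++ ·) s := by
      show List.foldl (· ++ ·) "" (s :: l) = _
      rw [List.foldl_cons]
      simp
    rw [List.foldl_cons, ih (a ++ s), hj, ih s, String.append_assoc]

lemma pvJoin_cons (s : String) (l : List String) :
    String.join (s :: l) = s ++ String.join l := by
  show List.foldl (· ++ ·) "" (s :: l) = _
  rw [List.foldl_cons, pvJoin_foldl]
  simp

lemma pvJoinB_cons (t : String) (ts : List String) (h : t ≠ "1") :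
    pvJoinB (t :: ts) = t ++ ";" ++ pvJoinB ts := by
  simp [pvJoinB, h, pvJoin_cons]

-- once flag = 2, A appends exactly the non-"1" tokens, each followed by ';'
lemma pvFoldA_flag2 (ts : List String) (r : String) :
    ts.foldl pvStepA (r, 2) = (r ++ pvJoinB ts, 2) := by
  induction ts generalizing r with
  | nil => simp [pvJoinB, String.join]
  | cons t ts ih =>
    by_cases h1 : t = "1"
    · subst h1
      simp [List.foldl_cons, pvStepA, ih, pvJoinB]
    · have h0 : pvStepA (r, 2) t = (r ++ t ++ ";", 2) := by
        simp [pvStepA, h1]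
      rw [List.foldl_cons, h0, ih, pvJoinB_cons t ts h1]
      simp [String.append_assoc]

-- the main invariant: from a pre-pivot state (flag 0 or 1) A's answer is exactly B's two-phase answer
lemma pvFoldA_pre (ts : List String) (flag : Int) (hf : flag = 0 ∨ flag = 1) :
    pvFinishA (ts.foldl pvStepA ("", flag)) =
      (let rest := ts.dropWhile (fun t => t == "0" || t == "1")
       if rest ≠ [] then pvJoinB rest
       else if ts.contains "0" ∨ flag = 1 then "OK"
       else "OK - no GET DATA link is provided") := by
  induction ts generalizing flag with
  | nil =>
    rcases hf with h | h <;> subst h <;> simp [pvFinishA]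
  | cons t ts ih =>
    have hflag2 : flag ≠ 2 := by rcases hf with h | h <;> omega
    by_cases h0 : t = "0"
    · subst h0
      have hst : pvStepA ("", flag) "0" = ("", 1) := by
        simp [pvStepA, hflag2]
      rw [List.foldl_cons, hst, ih 1 (Or.inr rfl)]
      simp
    · by_cases h1 : t = "1"
      · subst h1
        have hst : pvStepA ("", flag) "1" = ("", flag) := by
          simp [pvStepA]
        rw [List.foldl_cons, hst, ih flag hf]
        simp
      · have hst : pvStepA ("", flag) t = ("" ++ t ++ ";", 2) := by
          simp [pvStepA, h0, h1]
        rw [List.foldl_cons, hst, pvFoldA_flag2]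
        have hdw : (t :: ts).dropWhile (fun t => t == "0" || t == "1") = t :: ts := by
          simp [h0, h1]
        simp only [hdw]
        rw [pvJoinB_cons t ts h1]
        simp [pvFinishA]

-- ===== VERDICT (by name: the statement is the Claim_ definition above) =====
theorem check_Related_URL_Content_Type_spec : Claim_equal_check_Related_URL_Content_Type := by
  intro val _
  unfold Spec_check_Related_URL_Content_Type
  unfold check_Related_URL_Content_Type check_Related_URL_Content_Type_alt
  have h := pvFoldA_pre ((PySem.Str.split? val ";").getD []) 0 (Or.inl rfl)
  simp only [show (0:Int) = 1 ↔ False by norm_num, or_false] at h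
  exact h
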